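-- pv_equiv track=rewrite | github.com/schawla2/CensorProfanity | entryPoint.py | extract_filter_chars_and_format_input
-- ===== SOURCE A (Python) =====
-- def extract_filter_chars_and_format_input(filtered_response):
--     seen = set()
--     filters = ''
--     for c in filtered_response:
--         if c.isupper() and c not in seen:
--             seen.add(c)
--             filters += c
--     return f"{filters}|{filtered_response}" if len(filters) > 0 else filtered_response
-- ===== SOURCE B (Python) =====
-- def extract_filter_chars_and_format_input(filtered_response):
--     uppers = {c for c in filtered_response if c.isupper()}
--     filters = ''.join(sorted(uppers, key=filtered_response.index))
--     return f"{filters}|{filtered_response}" if len(filters) > 0 else filtered_response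
-- ===== Notes on version B (the rewrite author's own statement) =====
-- stated objective: idiomatic
-- what changed: B collects the distinct uppercase characters with a set comprehension and orders them by first appearance via sorted(..., key=filtered_response.index), replacing A's incremental seen-set/accumulator scan.
import Mathlib
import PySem

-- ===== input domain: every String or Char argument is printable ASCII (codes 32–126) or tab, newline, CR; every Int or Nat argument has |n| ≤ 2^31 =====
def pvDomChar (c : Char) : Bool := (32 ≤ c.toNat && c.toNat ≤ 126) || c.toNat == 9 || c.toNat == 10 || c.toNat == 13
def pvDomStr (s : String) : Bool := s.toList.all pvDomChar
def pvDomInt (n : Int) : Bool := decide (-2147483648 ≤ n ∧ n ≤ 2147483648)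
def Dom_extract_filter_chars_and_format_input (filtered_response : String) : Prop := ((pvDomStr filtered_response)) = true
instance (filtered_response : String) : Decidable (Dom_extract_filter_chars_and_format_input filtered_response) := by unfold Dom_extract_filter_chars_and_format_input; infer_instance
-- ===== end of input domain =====

-- B collects the distinct uppercase characters as a set and orders them by first appearance
-- with sorted(key=filtered_response.index), instead of A's incremental first-seen accumulation (idiomatic; same cost class).


-- ===== PORT A =====
-- the body of A's for-loop: if c.isupper() and c not in seen: seen.add(c); filters += c
def stepA (st : PySem.Set Char × List Char) (c : Char) : PySem.Set Char × List Char :=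
  if PySem.Chars.isupper c && !(PySem.Set.contains st.1 c) then (PySem.Set.add st.1 c, st.2 ++ [c]) else st

def extract_filter_chars_and_format_input (filtered_response : String) : String :=
  let l := filtered_response.toList
  let res := l.foldl stepA (PySem.Set.empty, [])
  if res.2.length > 0 then String.ofList (res.2 ++ '|' :: l) else filtered_response

-- ===== PORT B =====
def extract_filter_chars_and_format_input_alt (filtered_response : String) : String :=
  let l := filtered_response.toList
  -- uppers = {c for c in filtered_response if c.isupper()}
  let uppers : PySem.Set Char := PySem.Set.ofList (l.filter PySem.Chars.isupper)
  -- sorted(uppers, key=filtered_response.index): the key s.index(c) is the FIRST index of c in s,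
  -- which for every member of uppers is exactly l.idxOf c (s.index never raises here since each c occurs in s)
  let filters := PySem.List.sorted uppers (fun c => l.idxOf c)
  if filters.length > 0 then String.ofList (filters ++ '|' :: l) else filtered_response

-- ===== PRECONDITION & SPEC =====
def Spec_extract_filter_chars_and_format_input (filtered_response : String) (out : String) : Prop := out = extract_filter_chars_and_format_input_alt filtered_response
instance (filtered_response : String) (out : String) : Decidable (Spec_extract_filter_chars_and_format_input filtered_response out) := by unfold Spec_extract_filter_chars_and_format_input; infer_instance

-- ===== CLAIM (what is proved, stated in full; the proofs are below) =====
def Claim_equal_extract_filter_chars_and_format_input : Prop := ∀ (filtered_response : String), Dom_extract_filter_chars_and_format_input filtered_response → Spec_extract_filter_chars_and_format_input filtered_response (extract_filter_chars_and_format_input filtered_response)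

-- ===== LEMMAS AND PROOFS =====
-- A's loop keeps 'seen' and 'filters' equal as lists, and both equal folding Set.add over the uppercase filter.
lemma loopA_eq (l : List Char) : ∀ f : List Char,
    l.foldl stepA (f, f) = ((l.filter PySem.Chars.isupper).foldl PySem.Set.add f,
                            (l.filter PySem.Chars.isupper).foldl PySem.Set.add f) := by
  induction l with
  | nil => intro f; simp
  | cons c t ih =>
    intro f
    by_cases hp : PySem.Chars.isupper c
    · by_cases hc : c ∈ f
      · simpa [stepA, PySem.Set.contains, PySem.Set.add, hp, hc] using ih f
      · simpa [stepA, PySem.Set.contains, PySem.Set.add, hp, hc] using ih (f ++ [c])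
    · simpa [stepA, hp] using ih f

lemma filtersA (l : List Char) :
    (l.foldl stepA (PySem.Set.empty, [])).2 = PySem.Set.ofList (l.filter PySem.Chars.isupper) := by
  have h := loopA_eq l []
  simp [PySem.Set.empty] at h ⊢
  rw [h]
  rfl

-- the first-seen distinct elements of l.filter p appear in strictly increasing order of first index in l
lemma pw (p : Char → Bool) (l : List Char) :
    (PySem.Set.ofList (l.filter p)).Pairwise (fun a b => l.idxOf a < l.idxOf b) := by
  induction l with
  | nil => simp
  | cons c t ih =>
    by_cases hp : p c
    · rw [List.filter_cons_of_pos hp, PySem.Set.ofList_cons]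
      constructor
      · intro b hb
        rw [PySem.Set.mem_discard] at hb
        rw [List.idxOf_cons_self, List.idxOf_cons_ne t (Ne.symm hb.2)]
        omega
      · have hsub : ((PySem.Set.ofList (t.filter p)).discard c).Sublist (PySem.Set.ofList (t.filter p)) := by
          unfold PySem.Set.discard; exact List.filter_sublist
        refine (List.Pairwise.sublist hsub ih).imp_of_mem ?_
        intro a b ha hb hr
        rw [PySem.Set.mem_discard] at ha hb
        rw [List.idxOf_cons_ne t (Ne.symm ha.2), List.idxOf_cons_ne t (Ne.symm hb.2)]
        omega
    · rw [List.filter_cons_of_neg hp]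
      refine ih.imp_of_mem ?_
      intro a b ha hb hr
      rw [PySem.Set.mem_ofList] at ha hb
      have hac : a ≠ c := fun h => hp (h ▸ List.of_mem_filter ha)
      have hbc : b ≠ c := fun h => hp (h ▸ List.of_mem_filter hb)
      rw [List.idxOf_cons_ne t (Ne.symm hac), List.idxOf_cons_ne t (Ne.symm hbc)]
      omega

lemma filters_eq (l : List Char) :
    PySem.List.sorted (PySem.Set.ofList (l.filter PySem.Chars.isupper)) (fun c => l.idxOf c)
      = (l.foldl stepA (PySem.Set.empty, [])).2 := by
  rw [filtersA]
  exact PySem.List.sorted_eq_of_perm_of_pairwise_lt _ _ _ (List.Perm.refl _) (pw _ l)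

-- ===== VERDICT (by name: the statement is the Claim_ definition above) =====
theorem extract_filter_chars_and_format_input_spec : Claim_equal_extract_filter_chars_and_format_input := by
  intro s _
  unfold Spec_extract_filter_chars_and_format_input
  unfold extract_filter_chars_and_format_input extract_filter_chars_and_format_input_alt
  simp only [filters_eq]
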